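-- pv_equiv track=rewrite | github.com/salceson/PJN | lab5/ngrams.py | _get_ngrams_and_stats_from_text
-- ===== SOURCE A (Python) =====
-- from collections import defaultdict
--
-- def _get_ngrams_and_stats_from_text(text):
--     first = True
--     prev = ''
--     ngrams = defaultdict(int)
--     for word in text.split(' '):
--         if first:
--             prev = word
--             first = False
--             continue
--         ngrams[(prev, word)] += 1
--         prev = word
--     return ngrams
-- ===== SOURCE B (Python) =====
-- from collections import defaultdict
--
-- def _get_ngrams_and_stats_from_text(text):
--     # Staged grouping: materialise the adjacent pairs, dedupe them in
--     # first-occurrence order, then count each distinct pair with list.count.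
--     words = text.split(' ')
--     pairs = list(zip(words, words[1:]))
--     ngrams = defaultdict(int)
--     for pair in dict.fromkeys(pairs):
--         ngrams[pair] = pairs.count(pair)
--     return ngrams
-- ===== Notes on version B (the rewrite author's own statement) =====
-- stated objective: alternative
-- what changed: Replaces A's streaming prev/first state machine with incremental counter updates by a staged group-and-count: build the list of adjacent pairs, dedupe it in first-occurrence order (dict.fromkeys), and assign each distinct pair its total list.count once.
import Mathlib
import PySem

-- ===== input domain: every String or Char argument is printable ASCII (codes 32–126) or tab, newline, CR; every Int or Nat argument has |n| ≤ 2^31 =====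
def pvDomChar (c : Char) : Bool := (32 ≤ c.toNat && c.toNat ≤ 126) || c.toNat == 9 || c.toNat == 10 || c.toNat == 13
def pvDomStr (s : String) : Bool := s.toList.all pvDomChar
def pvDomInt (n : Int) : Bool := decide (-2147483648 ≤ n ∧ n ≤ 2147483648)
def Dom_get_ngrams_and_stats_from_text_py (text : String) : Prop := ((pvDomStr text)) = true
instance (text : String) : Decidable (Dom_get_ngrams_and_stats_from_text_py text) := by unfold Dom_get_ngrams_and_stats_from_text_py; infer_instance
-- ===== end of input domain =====

-- B replaces A's streaming prev/first state machine with a staged group-and-count: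
-- dedupe the adjacent pairs in first-occurrence order, then count each distinct pair once (objective: alternative).

-- ===== PORT A =====
-- A's loop: state (first, prev, ngrams); ngrams[(prev,word)] += 1 is Dict.modify _ 0 (· + 1).
def pvALoop (ws : List String) (first : Bool) (prev : String)
    (d : PySem.Dict (String × String) Int) : PySem.Dict (String × String) Int :=
  match ws with
  | [] => d
  | w :: rest =>
    if first then pvALoop rest false w d
    else pvALoop rest false w (d.modify (prev, w) 0 (· + 1))

def get_ngrams_and_stats_from_text_py (text : String) : List (String × String × Int) :=
  (pvALoop ((PySem.Str.split? text " ").getD []) true "" PySem.Dict.empty).items.map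
    (fun p => (p.1.1, p.1.2, p.2))

-- ===== PORT B =====
def get_ngrams_and_stats_from_text_py_alt (text : String) : List (String × String × Int) :=
  let words := (PySem.Str.split? text " ").getD []
  let pairs := words.zip (words.drop 1)
  ((PySem.List.dedup pairs).foldl (fun d p => d.insert p (pairs.count p : Int))
      PySem.Dict.empty).items.map
    (fun p => (p.1.1, p.1.2, p.2))

-- ===== PRECONDITION & SPEC =====
def Spec_get_ngrams_and_stats_from_text_py (text : String) (out : List (String × String × Int)) : Prop := out = get_ngrams_and_stats_from_text_py_alt text
instance (text : String) (out : List (String × String × Int)) : Decidable (Spec_get_ngrams_and_stats_from_text_py text out) := by unfold Spec_get_ngrams_and_stats_from_text_py; infer_instance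

-- ===== CLAIM =====
def Claim_equal_get_ngrams_and_stats_from_text_py : Prop := ∀ (text : String), Dom_get_ngrams_and_stats_from_text_py text → Spec_get_ngrams_and_stats_from_text_py text (get_ngrams_and_stats_from_text_py text)

-- ===== LEMMAS AND PROOFS =====
-- A's loop after the first word is the pair-counter fold over the zipped adjacent pairs.
theorem pvALoop_eq_counter (ws : List String) (prev : String)
    (d : PySem.Dict (String × String) Int) :
    pvALoop ws false prev d =
      ((prev :: ws).zip ws).foldl (fun d p => d.modify p 0 (· + 1)) d := by
  induction ws generalizing prev d with
  | nil => rfl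
  | cons w rest ih => simp [pvALoop, List.zip, ih]

-- ===== VERDICT =====
theorem get_ngrams_and_stats_from_text_py_spec : Claim_equal_get_ngrams_and_stats_from_text_py := by
  intro text _
  unfold Spec_get_ngrams_and_stats_from_text_py
  unfold get_ngrams_and_stats_from_text_py get_ngrams_and_stats_from_text_py_alt
  cases h : (PySem.Str.split? text " ").getD [] with
  | nil => rfl
  | cons w ws =>
    show (List.map _ (pvALoop ws false w PySem.Dict.empty).items) = _
    rw [pvALoop_eq_counter]
    have hz : (w :: ws).zip ws = (w :: ws).zip ((w :: ws).drop 1) := rfl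
    rw [hz]
    set pairs := (w :: ws).zip ((w :: ws).drop 1) with hp
    rw [← PySem.Dict.counter_eq_foldl, PySem.Dict.items_counter]
    show _ = List.map (fun p => (p.1.1, p.1.2, p.2))
      ((PySem.List.dedup pairs).foldl (fun d p => d.insert p ((pairs.count p : Int)))
        PySem.Dict.empty).items
    rw [PySem.Dict.items_foldl_insert_fresh (PySem.List.dedup pairs) (fun p => p)
          (fun p => (pairs.count p : Int)) PySem.Dict.empty
          (by intro a _; simp [PySem.Dict.contains_empty])
          (by simp)]
    simp [PySem.List.dedup_eq_ofList, PySem.Dict.empty]
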